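-- pv_equiv track=rewrite | github.com/bakkijeshwanth123-dev/CONSUMER | routes.py | validate_password_strength
-- ===== SOURCE A (Python) =====
-- import string
--
-- def validate_password_strength(password):
--
--     if len(password) < 8:
--
--         return False, "Password must be at least 8 characters long."
--
--     if not any(c.isupper() for c in password):
--
--         return False, "Password must contain at least one uppercase letter."
--
--     if not any(c.islower() for c in password):
--
--         return False, "Password must contain at least one lowercase letter."
--
--     if not any(c.isdigit() for c in password):
--
--         return False, "Password must contain at least one digit."
--
--     if not any(c in string.punctuation for c in password):
--
--         return False, "Password must contain at least one special character."
--
--     return True, ""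
-- ===== SOURCE B (Python) =====
-- import string
--
-- def validate_password_strength(password):
--     if len(password) < 8:
--         return False, "Password must be at least 8 characters long."
--     has_upper = has_lower = has_digit = has_special = False
--     for c in password:
--         if c.isupper():
--             has_upper = True
--         if c.islower():
--             has_lower = True
--         if c.isdigit():
--             has_digit = True
--         if c in string.punctuation:
--             has_special = True
--     if not has_upper:
--         return False, "Password must contain at least one uppercase letter."
--     if not has_lower:
--         return False, "Password must contain at least one lowercase letter."
--     if not has_digit:
--         return False, "Password must contain at least one digit."
--     if not has_special:
--         return False, "Password must contain at least one special character."
--     return True, ""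
-- ===== Notes on version B (the rewrite author's own statement) =====
-- stated objective: alternative
-- what changed: Replaces four separate short-circuiting any-scans with one accumulating pass that sets four booleans, followed by the same ordered cascade of checks.
import Mathlib
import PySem

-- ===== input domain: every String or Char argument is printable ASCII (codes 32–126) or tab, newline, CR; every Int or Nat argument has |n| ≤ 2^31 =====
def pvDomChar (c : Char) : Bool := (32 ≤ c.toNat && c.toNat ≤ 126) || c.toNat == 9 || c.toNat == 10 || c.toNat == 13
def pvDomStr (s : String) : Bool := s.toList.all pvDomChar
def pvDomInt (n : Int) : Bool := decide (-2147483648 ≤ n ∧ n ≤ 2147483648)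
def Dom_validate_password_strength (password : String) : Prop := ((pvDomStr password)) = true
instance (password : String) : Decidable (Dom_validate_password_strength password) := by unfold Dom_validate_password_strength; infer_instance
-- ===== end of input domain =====

-- B replaces A's four separate any-scans with one accumulating pass plus the same ordered cascade.
-- ===== PORT A =====
-- string.punctuation, as a literal list of characters
def pvPunct : List Char := "!\"#$%&'()*+,-./:;<=>?@[\\]^_`{|}~".toList

def validate_password_strength (password : String) : Bool × String :=
  if password.toList.length < 8 then
    (false, "Password must be at least 8 characters long.")
  else if !(password.toList.any (fun c => PySem.Chars.isupper c)) then
    (false, "Password must contain at least one uppercase letter.")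
  else if !(password.toList.any (fun c => PySem.Chars.islower c)) then
    (false, "Password must contain at least one lowercase letter.")
  else if !(password.toList.any (fun c => PySem.Chars.isdigit c)) then
    (false, "Password must contain at least one digit.")
  else if !(password.toList.any (fun c => pvPunct.contains c)) then
    (false, "Password must contain at least one special character.")
  else
    (true, "")

-- ===== PORT B =====
-- one pass over the characters, accumulating the four booleans
def pvScan (cs : List Char) (st : Bool × Bool × Bool × Bool) : Bool × Bool × Bool × Bool :=
  cs.foldl (fun st c =>
    (st.1 || PySem.Chars.isupper c,
     st.2.1 || PySem.Chars.islower c,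
     st.2.2.1 || PySem.Chars.isdigit c,
     st.2.2.2 || pvPunct.contains c)) st

def validate_password_strength_alt (password : String) : Bool × String :=
  if password.toList.length < 8 then
    (false, "Password must be at least 8 characters long.")
  else
    let st := pvScan password.toList (false, false, false, false)
    if !st.1 then (false, "Password must contain at least one uppercase letter.")
    else if !st.2.1 then (false, "Password must contain at least one lowercase letter.")
    else if !st.2.2.1 then (false, "Password must contain at least one digit.")
    else if !st.2.2.2 then (false, "Password must contain at least one special character.")
    else (true, "")

-- ===== PRECONDITION & SPEC =====
def Spec_validate_password_strength (password : String) (out : Bool × String) : Prop := out = validate_password_strength_alt password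
instance (password : String) (out : Bool × String) : Decidable (Spec_validate_password_strength password out) := by unfold Spec_validate_password_strength; infer_instance

-- ===== CLAIM (what is proved, stated in full; the proofs are below) =====
def Claim_equal_validate_password_strength : Prop := ∀ (password : String), Dom_validate_password_strength password → Spec_validate_password_strength password (validate_password_strength password)

-- ===== LEMMAS AND PROOFS =====
theorem pvScan_eq (cs : List Char) (a b c d : Bool) :
    pvScan cs (a, b, c, d) =
      (a || cs.any (fun x => PySem.Chars.isupper x),
       b || cs.any (fun x => PySem.Chars.islower x),
       c || cs.any (fun x => PySem.Chars.isdigit x),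
       d || cs.any (fun x => pvPunct.contains x)) := by
  induction cs generalizing a b c d with
  | nil => simp [pvScan]
  | cons x xs ih =>
    simp only [pvScan, List.foldl_cons, List.any_cons] at *
    rw [ih]
    simp [Bool.or_assoc]

-- ===== VERDICT (by name: the statement is the Claim_ definition above) =====
theorem validate_password_strength_spec : Claim_equal_validate_password_strength := by
  intro password _
  unfold Spec_validate_password_strength validate_password_strength validate_password_strength_alt
  simp only [pvScan_eq, Bool.false_or]
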